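-- pv_equiv track=rewrite | github.com/gsmVoiD/dsc80-2022-fa | labs/01-intro/assignment/lab.py | n_prefixes
-- ===== SOURCE A (Python) =====
-- def n_prefixes(s, n):
--     """
--     n_prefixes returns a string of n
--     consecutive prefix of the input string.
--
--     :param s: a string.
--     :param n: an integer
--
--     :returns: a string of n consecutive prefixes of s backwards.
--     :Example:
--     >>> n_prefixes('Billy', 4)
--     'BillBilBiB'
--     >>> n_prefixes('Marina', 3)
--     'MarMaM'
--     >>> n_prefixes('aaron', 2)
--     'aaa'
--     >>> n_prefixes('Justin', 5)
--     'JustiJustJusJuJ'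
--     >>> n_prefixes('', 1)
--     ''
--     """
--     if len(s) == 0:
--         return ""
--     new_str = ""
--     while n > 0:
--         for i in range(0, n):
--             new_str += s[i]
--         n -= 1
--     return new_str
-- ===== SOURCE B (Python) =====
-- def n_prefixes(s, n):
--     if len(s) == 0:
--         return ""
--     return ''.join(s[:i] for i in range(n, 0, -1))
-- ===== Notes on version B (the rewrite author's own statement) =====
-- stated objective: simpler
-- what changed: B replaces A's nested while/for loops that re-index s character by character and grow the result with quadratic += concatenation by a single join over decreasing-length prefix slices; Pre_ excludes nonempty s with n > len(s), where A raises IndexError.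
import Mathlib
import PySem

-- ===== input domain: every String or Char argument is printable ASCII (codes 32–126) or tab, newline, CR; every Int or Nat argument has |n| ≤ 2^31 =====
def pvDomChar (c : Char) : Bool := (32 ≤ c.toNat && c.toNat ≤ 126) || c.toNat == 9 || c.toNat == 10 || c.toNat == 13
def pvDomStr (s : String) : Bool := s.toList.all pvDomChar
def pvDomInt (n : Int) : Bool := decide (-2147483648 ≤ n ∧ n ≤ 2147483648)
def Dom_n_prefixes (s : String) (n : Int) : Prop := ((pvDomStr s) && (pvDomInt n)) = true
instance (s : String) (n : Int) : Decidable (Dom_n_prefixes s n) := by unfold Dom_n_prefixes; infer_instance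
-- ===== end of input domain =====

-- B joins decreasing-length slices instead of A's nested loops; return values only (no mutation).

-- ===== PORT A =====
-- for i in range(0, n): new_str += s[i]   (inside Pre_ every index is in range, so the default is never read)
def nprefA_inner (s : List Char) (n : Int) (acc : List Char) : List Char :=
  (PySem.List.pyRange 0 n 1).foldl (fun a i => a ++ [PySem.List.pyGetD s i ' ']) acc

-- while n > 0: … ; n -= 1   (fuel = n.toNat; at fuel m+1 the current n is m+1)
def nprefA_loop (s : List Char) : Nat → List Char → List Char
  | 0, acc => acc
  | m + 1, acc => nprefA_loop s m (nprefA_inner s ((m : Int) + 1) acc)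

def n_prefixes (s : String) (n : Int) : String :=
  if s.toList.length = 0 then "" else String.ofList (nprefA_loop s.toList n.toNat [])

-- ===== PORT B =====
-- ''.join(s[:i] for i in range(n, 0, -1))
def n_prefixes_alt (s : String) (n : Int) : String :=
  if s.toList.length = 0 then "" else
    String.ofList ((PySem.List.pyRange n 0 (-1)).foldl
      (fun acc i => acc ++ PySem.List.slice s.toList none (some i)) [])

-- ===== PRECONDITION & SPEC =====
-- Pre_ excludes exactly the inputs where A raises IndexError: a nonempty s with n > len(s).
def Pre_n_prefixes (s : String) (n : Int) : Prop :=
  s.toList = [] ∨ n ≤ (s.toList.length : Int)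
instance (s : String) (n : Int) : Decidable (Pre_n_prefixes s n) := by
  unfold Pre_n_prefixes; infer_instance

def pvWitness_n_prefixes : String × Int := ("Billy", 4)

def Spec_n_prefixes (s : String) (n : Int) (out : String) : Prop := out = n_prefixes_alt s n
instance (s : String) (n : Int) (out : String) : Decidable (Spec_n_prefixes s n out) := by
  unfold Spec_n_prefixes; infer_instance

-- ===== CLAIM (what is proved, stated in full; the proofs are below) =====
def Claim_equal_n_prefixes : Prop := ∀ (s : String) (n : Int), Dom_n_prefixes s n → Pre_n_prefixes s n → Spec_n_prefixes s n (n_prefixes s n)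

-- ===== LEMMAS AND PROOFS =====

-- the prefix of length j, as A's inner loop produces it
lemma pv_map_range_getD (s : List Char) (j : Nat) (h : j ≤ s.length) :
    (List.range j).map (fun k => s.getD k ' ') = s.take j := by
  induction j with
  | zero => simp
  | succ m ih =>
    rw [List.range_succ, List.map_append, ih (by omega)]
    have hm : m < s.length := by omega
    rw [List.take_add_one, List.getElem?_eq_getElem hm]
    simp [List.getD, List.getElem?_eq_getElem hm]

lemma pv_pyRange_map_getD (s : List Char) (n : Int) (h : n ≤ (s.length : Int)) :
    (PySem.List.pyRange 0 n 1).map (fun i => PySem.List.pyGetD s i ' ') = s.take n.toNat := by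
  rw [PySem.List.pyRange_one]
  simp only [List.map_map]
  have : ((fun i => PySem.List.pyGetD s i ' ') ∘ fun k : Nat => (0 : Int) + ↑k)
      = fun k : Nat => s.getD k ' ' := by
    funext k; simp [PySem.List.pyGetD_natCast]
  rw [this]
  have : ((n : Int) - 0).toNat = n.toNat := by omega
  rw [this, pv_map_range_getD s n.toNat (by omega)]

lemma pv_foldl_append_singleton {α β : Type} (f : β → α) (l : List β) (acc : List α) :
    l.foldl (fun a i => a ++ [f i]) acc = acc ++ l.map f := by
  induction l generalizing acc with
  | nil => simp
  | cons x xs ih => simp [ih]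

lemma pv_inner_eq (s : List Char) (n : Int) (acc : List Char) (h : n ≤ (s.length : Int)) :
    nprefA_inner s n acc = acc ++ s.take n.toNat := by
  unfold nprefA_inner
  rw [pv_foldl_append_singleton (fun i => PySem.List.pyGetD s i ' '),
      pv_pyRange_map_getD s n h]

-- the shared result: take k ++ take (k-1) ++ … ++ take 1
def pvAgg (s : List Char) : Nat → List Char
  | 0 => []
  | m + 1 => s.take (m + 1) ++ pvAgg s m

lemma pv_loopA_eq (s : List Char) (k : Nat) (acc : List Char)
    (h : (k : Int) ≤ (s.length : Int)) :
    nprefA_loop s k acc = acc ++ pvAgg s k := by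
  induction k generalizing acc with
  | zero => simp [nprefA_loop, pvAgg]
  | succ m ih =>
    rw [nprefA_loop, pv_inner_eq s ((m : Int) + 1) acc (by exact_mod_cast h),
        ih _ (by push_cast at h ⊢; omega)]
    have : (((m : Int) + 1)).toNat = m + 1 := by omega
    rw [this, pvAgg, List.append_assoc]

lemma pv_loopB_eq (s : List Char) (m : Int) (acc : List Char) (hm : 0 ≤ m) :
    (PySem.List.pyRange m 0 (-1)).foldl
      (fun acc i => acc ++ PySem.List.slice s none (some i)) acc
      = acc ++ pvAgg s m.toNat := by
  generalize hj : m.toNat = j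
  induction j generalizing m acc with
  | zero =>
    have : m = 0 := by omega
    subst this
    rw [PySem.List.pyRange_neg_one_eq_nil le_rfl]
    simp [pvAgg]
  | succ j ih =>
    rw [PySem.List.pyRange_neg_one_cons (by omega), List.foldl_cons,
        PySem.List.slice_to _ (by omega : (0:Int) ≤ m),
        ih (m - 1) _ (by omega) (by omega)]
    have h1 : m.toNat = j + 1 := hj
    rw [h1, pvAgg, List.append_assoc]

-- ===== VERDICT (by name: the statement is the Claim_ definition above) =====
theorem n_prefixes_spec : Claim_equal_n_prefixes := by
  intro s n _ hpre
  unfold Spec_n_prefixes n_prefixes n_prefixes_alt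
  rcases hpre with h | h
  · simp [h]
  · by_cases hs : s.toList.length = 0
    · simp [hs]
    · simp only [hs, ite_false]
      rw [pv_loopA_eq s.toList n.toNat [] (by omega)]
      by_cases hn : 0 ≤ n
      · rw [pv_loopB_eq s.toList n [] hn]
      · rw [PySem.List.pyRange_neg_one_eq_nil (by omega)]
        have : n.toNat = 0 := by omega
        simp [this, pvAgg]
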